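-- pv_equiv track=rewrite | github.com/AnfimovAleksandr/study_materials_old | Advanced_Python_AAD/lab_8/3.py | my_enumerate
-- ===== SOURCE A (Python) =====
-- def my_enumerate(iterable, start=0):
--     iter_iterable = iter(iterable)
--     index = start
--     while True:
--         try:
--             current = (index, next(iter_iterable))
--             index += 1
--         except StopIteration:
--             return
--         yield current
-- ===== SOURCE B (Python) =====
-- from itertools import count
--
-- def my_enumerate(iterable, start=0):
--     yield from zip(count(start), iterable)
-- ===== Notes on version B (the rewrite author's own statement) =====
-- stated objective: idiomatic
-- what changed: Replaces the hand-driven iterator loop with StopIteration handling and a manually incremented index by zipping itertools.count(start) with the iterable.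
import Mathlib
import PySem

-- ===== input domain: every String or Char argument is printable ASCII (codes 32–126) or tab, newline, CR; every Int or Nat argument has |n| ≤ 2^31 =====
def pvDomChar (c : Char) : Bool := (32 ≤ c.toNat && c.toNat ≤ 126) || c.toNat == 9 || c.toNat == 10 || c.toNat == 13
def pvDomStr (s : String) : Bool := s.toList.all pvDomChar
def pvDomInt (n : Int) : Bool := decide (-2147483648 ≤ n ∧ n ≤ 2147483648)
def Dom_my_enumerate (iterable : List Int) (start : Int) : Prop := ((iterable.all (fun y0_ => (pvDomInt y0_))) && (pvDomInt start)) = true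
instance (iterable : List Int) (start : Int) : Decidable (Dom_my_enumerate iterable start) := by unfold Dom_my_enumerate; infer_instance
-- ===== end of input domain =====

-- B replaces A's manual iterator loop with zip(count(start), iterable); idiomatic, same behaviour.


-- ===== PORT A =====
-- A drives the iterator by hand, yielding (index, value) and incrementing index.
def my_enumerate (iterable : List Int) (start : Int) : List (Int × Int) :=
  match iterable with
  | [] => []
  | x :: xs => (start, x) :: my_enumerate xs (start + 1)

-- ===== PORT B =====
-- B zips a stream of indices (count(start)) with the iterable.
def my_enumerate_alt (iterable : List Int) (start : Int) : List (Int × Int) :=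
  List.zip (List.map (fun k : Nat => start + (k : Int)) (List.range iterable.length)) iterable

-- ===== PRECONDITION & SPEC =====
def Spec_my_enumerate (iterable : List Int) (start : Int) (out : List (Int × Int)) : Prop := out = my_enumerate_alt iterable start
instance (iterable : List Int) (start : Int) (out : List (Int × Int)) : Decidable (Spec_my_enumerate iterable start out) := by unfold Spec_my_enumerate; infer_instance

-- ===== CLAIM (what is proved, stated in full; the proofs are below) =====
def Claim_equal_my_enumerate : Prop := ∀ (iterable : List Int) (start : Int), Dom_my_enumerate iterable start → Spec_my_enumerate iterable start (my_enumerate iterable start)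

-- ===== LEMMAS AND PROOFS =====

theorem alt_eq (iterable : List Int) (start : Int) :
    my_enumerate_alt iterable start = my_enumerate iterable start := by
  induction iterable generalizing start with
  | nil => rfl
  | cons x xs ih =>
    show _ = (start, x) :: my_enumerate xs (start + 1)
    rw [← ih (start + 1)]
    simp only [my_enumerate_alt, List.length_cons, List.range_succ_eq_map,
      List.map_cons, List.map_map, List.zip_cons_cons, Nat.cast_zero, add_zero]
    congr 2
    refine List.map_congr_left fun a _ => ?_
    simp only [Function.comp_apply, Nat.succ_eq_add_one]
    push_cast
    ring

-- ===== VERDICT (by name: the statement is the Claim_ definition above) =====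
theorem my_enumerate_spec : Claim_equal_my_enumerate := by
  intro iterable start _
  unfold Spec_my_enumerate
  exact (alt_eq iterable start).symm
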